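-- pv_equiv track=rewrite | github.com/lamps-lab/TSR-OCR-UQ | src/tsr_ocr.py | collapse_bounding_boxes
-- ===== SOURCE A (Python) =====
-- def collapse_bounding_boxes(bounding_boxes):
--     collapsed_boxes = []
--     for box in bounding_boxes:
--         x_coords = [point[0] for point in box]
--         y_coords = [point[1] for point in box]
--         x_min, y_min = min(x_coords), min(y_coords)
--         x_max, y_max = max(x_coords), max(y_coords)
--         collapsed_boxes.append([x_min, y_min, x_max, y_max])
--     return collapsed_boxes
-- ===== SOURCE B (Python) =====
-- def collapse_bounding_boxes(bounding_boxes):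
--     collapsed_boxes = []
--     for box in bounding_boxes:
--         first = box[0]
--         x_min = x_max = first[0]
--         y_min = y_max = first[1]
--         for point in box[1:]:
--             x = point[0]
--             y = point[1]
--             if x < x_min:
--                 x_min = x
--             elif x > x_max:
--                 x_max = x
--             if y < y_min:
--                 y_min = y
--             elif y > y_max:
--                 y_max = y
--         collapsed_boxes.append([x_min, y_min, x_max, y_max])
--     return collapsed_boxes
-- ===== Notes on version B (the rewrite author's own statement) =====
-- stated objective: alternative
-- what changed: Per box, compute all four extremes in a single pass over the points with comparison updates seeded from the first point, instead of materialising two coordinate lists and running four separate min/max scans.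
import Mathlib
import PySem

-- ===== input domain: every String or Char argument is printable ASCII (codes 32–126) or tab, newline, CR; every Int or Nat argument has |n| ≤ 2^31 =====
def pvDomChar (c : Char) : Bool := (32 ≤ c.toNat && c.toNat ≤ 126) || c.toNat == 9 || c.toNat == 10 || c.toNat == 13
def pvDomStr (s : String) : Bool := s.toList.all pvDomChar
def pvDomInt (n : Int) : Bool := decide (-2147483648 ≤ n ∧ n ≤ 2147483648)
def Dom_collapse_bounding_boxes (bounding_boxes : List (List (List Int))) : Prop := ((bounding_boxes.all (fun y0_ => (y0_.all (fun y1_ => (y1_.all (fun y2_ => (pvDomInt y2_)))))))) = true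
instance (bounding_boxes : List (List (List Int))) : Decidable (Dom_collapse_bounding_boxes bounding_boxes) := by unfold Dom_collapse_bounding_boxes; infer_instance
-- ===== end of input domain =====

-- B computes the four extremes of each box in a single pass seeded from the first point,
-- instead of building two coordinate lists and scanning each twice (alternative decomposition, same asymptotics).

-- ===== PORT A =====
-- point[0] / point[1]; under Pre_ every point has ≥ 2 coordinates so pyGet? is some (getD 0 is never taken)
def pvCoord (point : List Int) (i : Int) : Int := (PySem.List.pyGet? point i).getD 0

def collapse_bounding_boxes (bounding_boxes : List (List (List Int))) : List (List Int) :=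
  bounding_boxes.foldl (fun collapsed_boxes box =>
    let x_coords := box.map (fun point => pvCoord point 0)
    let y_coords := box.map (fun point => pvCoord point 1)
    match PySem.List.min? x_coords (fun v => v), PySem.List.min? y_coords (fun v => v),
          PySem.List.max? x_coords (fun v => v), PySem.List.max? y_coords (fun v => v) with
    | some x_min, some y_min, some x_max, some y_max =>
        collapsed_boxes ++ [[x_min, y_min, x_max, y_max]]
    | _, _, _, _ => collapsed_boxes  -- unreachable under Pre_ (Python raises ValueError on an empty box)
    ) []

-- ===== PORT B =====
-- one comparison-update step of B's inner loop; state = (x_min, y_min, x_max, y_max)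
def pvStep (s : Int × Int × Int × Int) (point : List Int) : Int × Int × Int × Int :=
  let x := pvCoord point 0
  let y := pvCoord point 1
  let (x_min, y_min, x_max, y_max) := s
  let (x_min, x_max) := if x < x_min then (x, x_max) else if x > x_max then (x_min, x) else (x_min, x_max)
  let (y_min, y_max) := if y < y_min then (y, y_max) else if y > y_max then (y_min, y) else (y_min, y_max)
  (x_min, y_min, x_max, y_max)

def pvBoxAlt (box : List (List Int)) : List Int :=
  match box with
  | [] => []  -- unreachable under Pre_ (Python raises IndexError on box[0])
  | first :: rest =>
    let x0 := pvCoord first 0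
    let y0 := pvCoord first 1
    let s := rest.foldl pvStep (x0, y0, x0, y0)
    [s.1, s.2.1, s.2.2.1, s.2.2.2]

def collapse_bounding_boxes_alt (bounding_boxes : List (List (List Int))) : List (List Int) :=
  bounding_boxes.map pvBoxAlt

-- ===== PRECONDITION & SPEC =====
-- Pre_ = exactly the inputs where Python A returns: every box nonempty (else min() on an empty sequence raises
-- ValueError) and every point with at least 2 coordinates (else point[0]/point[1] raises IndexError).
def Pre_collapse_bounding_boxes (bounding_boxes : List (List (List Int))) : Prop :=
  ∀ box ∈ bounding_boxes, box ≠ [] ∧ ∀ point ∈ box, 2 ≤ point.length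
instance (bounding_boxes : List (List (List Int))) : Decidable (Pre_collapse_bounding_boxes bounding_boxes) := by unfold Pre_collapse_bounding_boxes; infer_instance

def pvWitness_collapse_bounding_boxes : List (List (List Int)) := [[[1, 2], [3, 0], [2, 5]], [[0, 0]]]

def Spec_collapse_bounding_boxes (bounding_boxes : List (List (List Int))) (out : List (List Int)) : Prop := out = collapse_bounding_boxes_alt bounding_boxes
instance (bounding_boxes : List (List (List Int))) (out : List (List Int)) : Decidable (Spec_collapse_bounding_boxes bounding_boxes out) := by unfold Spec_collapse_bounding_boxes; infer_instance

-- ===== CLAIM (what is proved, stated in full; the proofs are below) =====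
def Claim_equal_collapse_bounding_boxes : Prop := ∀ (bounding_boxes : List (List (List Int))), Dom_collapse_bounding_boxes bounding_boxes → Pre_collapse_bounding_boxes bounding_boxes → Spec_collapse_bounding_boxes bounding_boxes (collapse_bounding_boxes bounding_boxes)

-- ===== LEMMAS AND PROOFS =====

-- B's one-pass fold computes the four independent min/max folds, given min ≤ max on entry.
lemma pvStep_fold (l : List (List Int)) : ∀ a b c d : Int, a ≤ c → b ≤ d →
    l.foldl pvStep (a, b, c, d) =
      ((l.map (fun p => pvCoord p 0)).foldl min a,
       (l.map (fun p => pvCoord p 1)).foldl min b,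
       (l.map (fun p => pvCoord p 0)).foldl max c,
       (l.map (fun p => pvCoord p 1)).foldl max d) := by
  induction l with
  | nil => intro a b c d _ _; simp
  | cons q l ih =>
    intro a b c d hac hbd
    have hstep : pvStep (a, b, c, d) q =
        (min a (pvCoord q 0), min b (pvCoord q 1), max c (pvCoord q 0), max d (pvCoord q 1)) := by
      simp only [pvStep]
      split_ifs <;> simp_all <;> omega
    simp only [List.foldl_cons, List.map_cons, hstep]
    exact ih _ _ _ _ (le_trans (min_le_left _ _) (le_trans hac (le_max_left _ _)))
                     (le_trans (min_le_left _ _) (le_trans hbd (le_max_left _ _)))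

-- on a nonempty box, A's per-box computation yields exactly B's per-box value
lemma pvBox_eq (box : List (List Int)) (hne : box ≠ []) :
    (match PySem.List.min? (box.map (fun p => pvCoord p 0)) (fun v => v),
           PySem.List.min? (box.map (fun p => pvCoord p 1)) (fun v => v),
           PySem.List.max? (box.map (fun p => pvCoord p 0)) (fun v => v),
           PySem.List.max? (box.map (fun p => pvCoord p 1)) (fun v => v) with
     | some x_min, some y_min, some x_max, some y_max => [[x_min, y_min, x_max, y_max]]
     | _, _, _, _ => ([] : List (List Int))) = [pvBoxAlt box] := by
  match box with
  | [] => exact absurd rfl hne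
  | first :: rest =>
    simp only [List.map_cons, PySem.List.min?_id_cons, PySem.List.max?_id_cons, pvBoxAlt,
      pvStep_fold rest _ _ _ _ le_rfl le_rfl]

lemma pv_foldA (bbs : List (List (List Int))) : ∀ acc : List (List Int),
    (∀ box ∈ bbs, box ≠ []) →
    bbs.foldl (fun collapsed_boxes box =>
      let x_coords := box.map (fun point => pvCoord point 0)
      let y_coords := box.map (fun point => pvCoord point 1)
      match PySem.List.min? x_coords (fun v => v), PySem.List.min? y_coords (fun v => v),
            PySem.List.max? x_coords (fun v => v), PySem.List.max? y_coords (fun v => v) with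
      | some x_min, some y_min, some x_max, some y_max =>
          collapsed_boxes ++ [[x_min, y_min, x_max, y_max]]
      | _, _, _, _ => collapsed_boxes) acc = acc ++ bbs.map pvBoxAlt := by
  induction bbs with
  | nil => intro acc _; simp
  | cons box bbs ih =>
    intro acc h
    have hbox := pvBox_eq box (h box (List.mem_cons_self))
    simp only [List.foldl_cons, List.map_cons]
    rw [ih _ (fun b hb => h b (List.mem_cons_of_mem _ hb))]
    revert hbox
    cases PySem.List.min? (box.map (fun p => pvCoord p 0)) (fun v => v) <;>
      cases PySem.List.min? (box.map (fun p => pvCoord p 1)) (fun v => v) <;>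
      cases PySem.List.max? (box.map (fun p => pvCoord p 0)) (fun v => v) <;>
      cases PySem.List.max? (box.map (fun p => pvCoord p 1)) (fun v => v) <;>
      simp_all

-- ===== VERDICT (by name: the statement is the Claim_ definition above) =====
theorem collapse_bounding_boxes_spec : Claim_equal_collapse_bounding_boxes := by
  intro bbs _ hpre
  show collapse_bounding_boxes bbs = collapse_bounding_boxes_alt bbs
  unfold collapse_bounding_boxes collapse_bounding_boxes_alt
  rw [pv_foldA bbs [] (fun b hb => (hpre b hb).1)]
  simp
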